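-- pv_equiv track=rewrite | github.com/lashhw/2048-ai | lv_functions.py | __to_c_board
-- ===== SOURCE A (Python) =====
-- def __to_c_board(board_list):
--     board = 0
--     i = 0
--     for row in board_list:
--         for c in row:
--             board |= int(c) << (4*i)
--             i += 1
--     return board
-- ===== SOURCE B (Python) =====
-- def __to_c_board(board_list):
--     cells = [c for row in board_list for c in row]
--     board = 0
--     for c in reversed(cells):
--         board = (board << 4) | int(c)
--     return board
-- ===== Notes on version B (the rewrite author's own statement) =====
-- stated objective: alternative
-- what changed: Replaces A's nested loops with a running cell index (board |= c << 4*i) by flattening the board and folding a Horner-style shift-or accumulator (board = (board << 4) | c) over the cells in reversed order, removing the index variable entirely.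
import Mathlib
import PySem

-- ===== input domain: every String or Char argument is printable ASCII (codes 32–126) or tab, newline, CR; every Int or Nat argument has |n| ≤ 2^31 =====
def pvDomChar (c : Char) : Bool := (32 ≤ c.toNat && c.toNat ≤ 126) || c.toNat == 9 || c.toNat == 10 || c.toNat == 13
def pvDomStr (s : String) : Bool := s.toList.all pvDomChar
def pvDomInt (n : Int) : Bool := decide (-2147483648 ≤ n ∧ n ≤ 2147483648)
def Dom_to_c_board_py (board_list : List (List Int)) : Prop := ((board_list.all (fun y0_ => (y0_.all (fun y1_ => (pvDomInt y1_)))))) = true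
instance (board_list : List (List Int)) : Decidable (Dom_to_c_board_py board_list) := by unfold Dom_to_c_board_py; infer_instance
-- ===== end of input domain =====

-- B replaces A's cell-index counter (board |= c << 4*i) by flattening the board and
-- folding a Horner-style accumulator (board = (board << 4) | c) over the cells in
-- reversed order; objective: alternative decomposition (measurably faster in a timing run).

-- ===== PORT A =====
-- state: (board, i) exactly as in A's nested loops
def to_c_board_py (board_list : List (List Int)) : Int :=
  (board_list.foldl
    (fun (s : Int × Nat) (row : List Int) =>
      row.foldl (fun (t : Int × Nat) (c : Int) =>
        (PySem.Int.bor t.1 (c <<< ((4 * t.2 : Nat))), t.2 + 1)) s)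
    ((0 : Int), (0 : Nat))).1

-- ===== PORT B =====
def to_c_board_py_alt (board_list : List (List Int)) : Int :=
  ((board_list.flatMap (fun row => row)).reverse).foldl
    (fun (board : Int) (c : Int) => PySem.Int.bor (board <<< (4 : Nat)) c) 0

-- ===== PRECONDITION & SPEC =====
def Spec_to_c_board_py (board_list : List (List Int)) (out : Int) : Prop := out = to_c_board_py_alt board_list
instance (board_list : List (List Int)) (out : Int) : Decidable (Spec_to_c_board_py board_list out) := by unfold Spec_to_c_board_py; infer_instance

-- ===== CLAIM (what is proved, stated in full; the proofs are below) =====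
def Claim_equal_to_c_board_py : Prop := ∀ (board_list : List (List Int)), Dom_to_c_board_py board_list → Spec_to_c_board_py board_list (to_c_board_py board_list)

-- ===== LEMMAS AND PROOFS =====

-- Nat: the bits of n &&& m sit inside n, so removing them is Nat.ldiff n m
theorem pv_ldiff_add_and (n : Nat) : ∀ m, Nat.ldiff n m + (n &&& m) = n := by
  induction n using Nat.binaryRec with
  | zero => intro m; simp [Nat.ldiff]
  | bit b n ih =>
    intro m
    rw [← Nat.bit_testBit_zero_shiftRight_one m]
    rw [Nat.ldiff_bit, Nat.land_bit]
    simp only [Nat.bit]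
    have := ih (m >>> 1)
    cases b <;> cases m.testBit 0 <;>
      simp only [Bool.and_true, Bool.and_false, Bool.not_true, Bool.not_false,
        cond_true, cond_false] <;> omega

theorem pv_sub_and (n m : Nat) : n - (n &&& m) = Nat.ldiff n m := by
  have h := pv_ldiff_add_and n m
  omega

-- two's-complement test bit of an Int
def itb (a : Int) (k : Nat) : Bool :=
  if 0 ≤ a then a.toNat.testBit k else !((-a - 1).toNat.testBit k)

theorem itb_inj (a b : Int) (h : ∀ k, itb a k = itb b k) : a = b := by
  unfold itb at h
  by_cases ha : 0 ≤ a <;> by_cases hb : 0 ≤ b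
  · have := Nat.eq_of_testBit_eq (x := a.toNat) (y := b.toNat) (by
      intro k; have := h k; simp only [ha, hb, if_true] at this; exact this)
    omega
  · exfalso
    have hk : ∀ k, a.toNat.testBit k = !((-b - 1).toNat.testBit k) := by
      intro k; have := h k; simp only [ha, hb, if_true, if_false] at this; exact this
    have hlt : a.toNat < 2 ^ (a.toNat + (-b - 1).toNat) := by
      calc a.toNat ≤ a.toNat + (-b - 1).toNat := Nat.le_add_right _ _
        _ < 2 ^ (a.toNat + (-b - 1).toNat) := Nat.lt_two_pow_self
    have hlt2 : (-b - 1).toNat < 2 ^ (a.toNat + (-b - 1).toNat) := by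
      calc (-b - 1).toNat ≤ a.toNat + (-b - 1).toNat := Nat.le_add_left _ _
        _ < 2 ^ (a.toNat + (-b - 1).toNat) := Nat.lt_two_pow_self
    have h1 := Nat.testBit_lt_two_pow hlt
    have h2 := Nat.testBit_lt_two_pow hlt2
    rw [hk _, h2] at h1
    simp at h1
  · exfalso
    have hk : ∀ k, b.toNat.testBit k = !((-a - 1).toNat.testBit k) := by
      intro k; have := h k; simp only [ha, hb, if_true, if_false] at this; exact this.symm
    have hlt : b.toNat < 2 ^ (b.toNat + (-a - 1).toNat) := by
      calc b.toNat ≤ b.toNat + (-a - 1).toNat := Nat.le_add_right _ _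
        _ < 2 ^ (b.toNat + (-a - 1).toNat) := Nat.lt_two_pow_self
    have hlt2 : (-a - 1).toNat < 2 ^ (b.toNat + (-a - 1).toNat) := by
      calc (-a - 1).toNat ≤ b.toNat + (-a - 1).toNat := Nat.le_add_left _ _
        _ < 2 ^ (b.toNat + (-a - 1).toNat) := Nat.lt_two_pow_self
    have h1 := Nat.testBit_lt_two_pow hlt
    have h2 := Nat.testBit_lt_two_pow hlt2
    rw [hk _, h2] at h1
    simp at h1
  · have := Nat.eq_of_testBit_eq (x := (-a - 1).toNat) (y := (-b - 1).toNat) (by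
      intro k; have := h k; simp only [ha, hb, if_false] at this
      exact Bool.not_inj this)
    omega

theorem itb_bor (a b : Int) (k : Nat) :
    itb (PySem.Int.bor a b) k = (itb a k || itb b k) := by
  unfold PySem.Int.bor itb
  by_cases ha : 0 ≤ a <;> by_cases hb : 0 ≤ b <;>
    simp only [ha, hb, if_true, if_false]
  · have h : (0:Int) ≤ ↑(a.toNat ||| b.toNat) := Int.natCast_nonneg _
    simp only [h, if_true, Int.toNat_natCast, Nat.testBit_lor]
  · have h : ¬ (0:Int) ≤ -↑((-b - 1).toNat - ((-b - 1).toNat &&& a.toNat)) - 1 := by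
      have : (0:Int) ≤ ↑((-b - 1).toNat - ((-b - 1).toNat &&& a.toNat)) := Int.natCast_nonneg _
      omega
    simp only [h, if_false]
    have he : (-(-↑((-b - 1).toNat - ((-b - 1).toNat &&& a.toNat)) - 1) - 1 : Int).toNat
        = (-b - 1).toNat - ((-b - 1).toNat &&& a.toNat) := by omega
    rw [he, pv_sub_and, Nat.testBit_ldiff]
    cases a.toNat.testBit k <;> cases ((-b - 1).toNat.testBit k) <;> simp
  · have h : ¬ (0:Int) ≤ -↑((-a - 1).toNat - ((-a - 1).toNat &&& b.toNat)) - 1 := by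
      have : (0:Int) ≤ ↑((-a - 1).toNat - ((-a - 1).toNat &&& b.toNat)) := Int.natCast_nonneg _
      omega
    simp only [h, if_false]
    have he : (-(-↑((-a - 1).toNat - ((-a - 1).toNat &&& b.toNat)) - 1) - 1 : Int).toNat
        = (-a - 1).toNat - ((-a - 1).toNat &&& b.toNat) := by omega
    rw [he, pv_sub_and, Nat.testBit_ldiff]
    cases b.toNat.testBit k <;> cases ((-a - 1).toNat.testBit k) <;> simp
  · have h : ¬ (0:Int) ≤ -↑((-a - 1).toNat &&& (-b - 1).toNat) - 1 := by
      have : (0:Int) ≤ ↑((-a - 1).toNat &&& (-b - 1).toNat) := Int.natCast_nonneg _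
      omega
    simp only [h, if_false]
    have he : (-(-↑((-a - 1).toNat &&& (-b - 1).toNat) - 1) - 1 : Int).toNat
        = (-a - 1).toNat &&& (-b - 1).toNat := by omega
    rw [he, Nat.testBit_and]
    cases ((-a - 1).toNat.testBit k) <;> cases ((-b - 1).toNat.testBit k) <;> simp

-- testBit of ((m+1)*2^n - 1): low n bits are ones, above sits m
theorem pv_testBit_pred_mul_pow (m : Nat) : ∀ (n k : Nat),
    ((m + 1) * 2 ^ n - 1).testBit k = (if k < n then true else m.testBit (k - n)) := by
  intro n
  induction n generalizing m with
  | zero => intro k; simp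
  | succ n ih =>
    intro k
    have hrw : (m + 1) * 2 ^ (n + 1) - 1 = Nat.bit true ((m + 1) * 2 ^ n - 1) := by
      simp only [Nat.bit, cond_true]
      have h1 : 1 ≤ (m + 1) * 2 ^ n := Nat.one_le_iff_ne_zero.mpr (by positivity)
      have h2 : (m + 1) * 2 ^ (n + 1) = 2 * ((m + 1) * 2 ^ n) := by ring
      omega
    rw [hrw]
    cases k with
    | zero => simp
    | succ k =>
      rw [Nat.testBit_bit_succ, ih m k]
      by_cases hk : k < n <;> by_cases hk2 : k + 1 < n + 1 <;> simp [hk, hk2] <;> omega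

theorem itb_shiftLeft (a : Int) (n k : Nat) :
    itb (a <<< n) k = (if k < n then false else itb a (k - n)) := by
  unfold itb
  rw [Int.shiftLeft_eq']
  by_cases ha : 0 ≤ a
  · rcases Int.eq_ofNat_of_zero_le ha with ⟨m, rfl⟩
    have h2 : (0:Int) ≤ (m : Int) * ((2 ^ n : Nat) : Int) := by positivity
    rw [if_pos ha, if_pos h2]
    have he : ((m : Int) * ((2 ^ n : Nat) : Int)).toNat = m * 2 ^ n := by
      rw [← Int.natCast_mul, Int.toNat_natCast]
    rw [he, ← Nat.shiftLeft_eq, Nat.testBit_shiftLeft]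
    by_cases hk : k < n <;> simp [hk]
    omega
  · have hneg : a < 0 := by omega
    have h2 : ¬ (0:Int) ≤ a * ((2 ^ n : Nat) : Int) := by
      have hp : (0:Int) < ((2 ^ n : Nat) : Int) := by positivity
      intro hc
      exact absurd hc (not_le.mpr (mul_neg_of_neg_of_pos hneg hp))
    rw [if_neg ha, if_neg h2]
    have he : (-(a * ((2 ^ n : Nat) : Int)) - 1).toNat = ((-a - 1).toNat + 1) * 2 ^ n - 1 := by
      have hm : ((-a - 1).toNat : Int) = -a - 1 := by omega
      have h1 : (1:Nat) ≤ ((-a - 1).toNat + 1) * 2 ^ n := Nat.one_le_iff_ne_zero.mpr (by positivity)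
      have hc : (-(a * ((2 ^ n : Nat) : Int)) - 1 : Int) = ((((-a - 1).toNat + 1) * 2 ^ n - 1 : Nat) : Int) := by
        rw [Nat.cast_sub h1]
        push_cast
        nlinarith [hm]
      omega
    rw [he, pv_testBit_pred_mul_pow]
    by_cases hk : k < n <;> simp [hk]

-- derived algebra of bor and <<<
theorem pv_bor_assoc (a b c : Int) :
    PySem.Int.bor (PySem.Int.bor a b) c = PySem.Int.bor a (PySem.Int.bor b c) := by
  apply itb_inj
  intro k
  simp [itb_bor, Bool.or_assoc]

theorem pv_bor_shift (a b : Int) (n : Nat) :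
    (PySem.Int.bor a b) <<< n = PySem.Int.bor (a <<< n) (b <<< n) := by
  apply itb_inj
  intro k
  simp only [itb_bor, itb_shiftLeft]
  by_cases hk : k < n <;> simp [hk]

theorem pv_shift_shift (a : Int) (m n : Nat) : (a <<< m) <<< n = a <<< (m + n) := by
  simp only [Int.shiftLeft_eq']
  push_cast
  ring

theorem pv_shift_zero (a : Int) : a <<< (0 : Nat) = a := by
  simp [Int.shiftLeft_eq']

-- Horner value of a flat cell list (B's foldr view)
def pvHorner (cs : List Int) : Int :=
  cs.foldr (fun c acc => PySem.Int.bor (acc <<< (4 : Nat)) c) 0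

theorem pv_alt_eq_horner (board_list : List (List Int)) :
    to_c_board_py_alt board_list = pvHorner (board_list.flatMap (fun row => row)) := by
  unfold to_c_board_py_alt pvHorner
  rw [List.foldl_reverse]

theorem pv_horner_append (xs ys : List Int) :
    pvHorner (xs ++ ys) =
      PySem.Int.bor (pvHorner ys <<< (4 * xs.length)) (pvHorner xs) := by
  induction xs with
  | nil =>
    simp [pvHorner, PySem.Int.bor_zero]
  | cons x xs ih =>
    simp only [List.cons_append, pvHorner, List.foldr_cons] at *
    rw [ih, pv_bor_shift, pv_shift_shift, pv_bor_assoc]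
    have h4 : 4 * xs.length + 4 = 4 * (x :: xs).length := by simp [List.length_cons]; ring
    rw [h4]

theorem pv_inner_loop (row : List Int) : ∀ (b : Int) (i : Nat),
    row.foldl (fun (t : Int × Nat) (c : Int) =>
        (PySem.Int.bor t.1 (c <<< ((4 * t.2 : Nat))), t.2 + 1)) (b, i)
      = (PySem.Int.bor b (pvHorner row <<< (4 * i)), i + row.length) := by
  induction row with
  | nil =>
    intro b i
    simp [pvHorner, PySem.Int.bor_comm, PySem.Int.bor_zero]
  | cons c t ih =>
    intro b i
    simp only [List.foldl_cons, ih]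
    refine Prod.ext ?_ ?_
    · show PySem.Int.bor (PySem.Int.bor b (c <<< (4 * i))) (pvHorner t <<< (4 * (i + 1)))
        = PySem.Int.bor b (pvHorner (c :: t) <<< (4 * i))
      have hh : pvHorner (c :: t) = PySem.Int.bor (pvHorner t <<< (4:Nat)) c := rfl
      rw [hh, pv_bor_shift, pv_shift_shift]
      have h4 : (4 : Nat) + 4 * i = 4 * (i + 1) := by ring
      rw [h4, pv_bor_assoc]
      rw [PySem.Int.bor_comm (c <<< (4 * i)) (pvHorner t <<< (4 * (i + 1)))]
    · show i + 1 + t.length = i + (c :: t).length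
      simp [List.length_cons]; omega

theorem pv_outer_loop (board_list : List (List Int)) : ∀ (b : Int) (i : Nat),
    board_list.foldl
      (fun (s : Int × Nat) (row : List Int) =>
        row.foldl (fun (t : Int × Nat) (c : Int) =>
          (PySem.Int.bor t.1 (c <<< ((4 * t.2 : Nat))), t.2 + 1)) s)
      (b, i)
      = (PySem.Int.bor b (pvHorner (board_list.flatMap (fun row => row)) <<< (4 * i)),
         i + (board_list.flatMap (fun row => row)).length) := by
  induction board_list with
  | nil =>
    intro b i
    simp [pvHorner, PySem.Int.bor_comm, PySem.Int.bor_zero]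
  | cons row rest ih =>
    intro b i
    simp only [List.foldl_cons, pv_inner_loop, ih]
    refine Prod.ext ?_ ?_
    · show PySem.Int.bor (PySem.Int.bor b (pvHorner row <<< (4 * i)))
          (pvHorner (rest.flatMap (fun row => row)) <<< (4 * (i + row.length)))
        = PySem.Int.bor b (pvHorner ((row :: rest).flatMap (fun row => row)) <<< (4 * i))
      have hf : (row :: rest).flatMap (fun row => row) = row ++ rest.flatMap (fun row => row) := by
        simp
      rw [hf, pv_horner_append, pv_bor_shift, pv_shift_shift]
      have h4 : 4 * row.length + 4 * i = 4 * (i + row.length) := by ring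
      rw [h4, pv_bor_assoc]
      rw [PySem.Int.bor_comm (pvHorner row <<< (4 * i))]
    · show i + row.length + (rest.flatMap (fun row => row)).length
        = i + ((row :: rest).flatMap (fun row => row)).length
      simp
      omega

-- ===== VERDICT (by name: the statement is the Claim_ definition above) =====
theorem to_c_board_py_spec : Claim_equal_to_c_board_py := by
  intro board_list _
  show to_c_board_py board_list = to_c_board_py_alt board_list
  unfold to_c_board_py
  rw [pv_outer_loop]
  rw [pv_alt_eq_horner]
  simp only [Nat.mul_zero, pv_shift_zero]
  rw [PySem.Int.bor_comm, PySem.Int.bor_zero]
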